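-- pv_equiv track=rewrite | github.com/hh-blaire-cho/acsl | swea/c2/bit_string_flicking_2.py | solve
-- ===== SOURCE A (Python) =====
-- def bit_and(x, y):
--     ret = ""
--     for i in range(len(x)):
--         if x[i] == "1" and y[i] == "1":
--             ret += "1"
--         else:
--             ret += "0"
--     return ret
--
-- def bit_or(x, y):
--     ret = ""
--     for i in range(len(x)):
--         if x[i] == "1" or y[i] == "1":
--             ret += "1"
--         else:
--             ret += "0"
--     return ret
--
-- def bit_xor(x, y):
--     ret = ""
--     for i in range(len(x)):
--         if x[i] != y[i]:
--             ret += "1"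
--         else:
--             ret += "0"
--     return ret
--
-- def solve(s):
--     tokens = s.split()
--     result = tokens[0]
--     i = 1
--     while i < len(tokens):
--         op = tokens[i]
--         nxt = tokens[i + 1]
--         if op == "AND":
--             result = bit_and(result, nxt)
--         elif op == "OR":
--             result = bit_or(result, nxt)
--         else:
--             result = bit_xor(result, nxt)
--         i = i + 2
--     return result
-- ===== SOURCE B (Python) =====
-- def solve(s):
--     tokens = s.split()
--     first = tokens[0]
--     out = []
--     for k in range(len(first)):
--         bit = first[k]
--         for j in range(1, len(tokens), 2):
--             op = tokens[j]
--             b = tokens[j + 1][k]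
--             if op == "AND":
--                 bit = "1" if bit == "1" and b == "1" else "0"
--             elif op == "OR":
--                 bit = "1" if bit == "1" or b == "1" else "0"
--             else:
--                 bit = "1" if bit != b else "0"
--         out.append(bit)
--     return "".join(out)
-- ===== Notes on version B (the rewrite author's own statement) =====
-- stated objective: alternative
-- what changed: Column-major traversal: B computes each output position independently, folding the operator chain over a single-character accumulator per column, instead of A's row-by-row passes that build a full intermediate string per operator via three helper functions.
-- outside the precondition, e.g. on solve('B1\tOR R'): A returns '01', B raises IndexError
import Mathlib
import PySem

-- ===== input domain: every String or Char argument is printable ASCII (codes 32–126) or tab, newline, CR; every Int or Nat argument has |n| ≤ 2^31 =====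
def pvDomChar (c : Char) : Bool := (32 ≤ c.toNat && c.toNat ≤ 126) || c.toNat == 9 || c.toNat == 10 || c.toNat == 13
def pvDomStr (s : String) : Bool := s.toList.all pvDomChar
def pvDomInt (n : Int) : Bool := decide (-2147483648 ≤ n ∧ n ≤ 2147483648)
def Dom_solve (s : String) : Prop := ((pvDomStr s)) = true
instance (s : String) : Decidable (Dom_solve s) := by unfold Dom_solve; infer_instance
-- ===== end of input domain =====

-- B evaluates the expression column by column with a one-character accumulator per output
-- position, replacing A's row-by-row passes that build an intermediate string per operator
-- through three helper functions (objective: alternative; same asymptotic cost).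

-- ===== PORT A =====
-- bit_and: builds the result string character by character over range(len(x))
def pvBitAnd (x y : List Char) : List Char :=
  (PySem.List.pyRange 0 x.length 1).foldl
    (fun ret i =>
      ret ++ [if PySem.List.pyGetD x i ' ' = '1' ∧ PySem.List.pyGetD y i ' ' = '1' then '1' else '0'])
    []

def pvBitOr (x y : List Char) : List Char :=
  (PySem.List.pyRange 0 x.length 1).foldl
    (fun ret i =>
      ret ++ [if PySem.List.pyGetD x i ' ' = '1' ∨ PySem.List.pyGetD y i ' ' = '1' then '1' else '0'])
    []

def pvBitXor (x y : List Char) : List Char :=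
  (PySem.List.pyRange 0 x.length 1).foldl
    (fun ret i =>
      ret ++ [if PySem.List.pyGetD x i ' ' ≠ PySem.List.pyGetD y i ' ' then '1' else '0'])
    []

-- the 'while i < len(tokens): … i = i + 2' loop, recursion on the remaining index range
def pvLoopA (ts : List (List Char)) (result : List Char) (i : Nat) : List Char :=
  if i < ts.length then
    let op := PySem.List.pyGetD ts (i : Int) []
    let nxt := PySem.List.pyGetD ts ((i : Int) + 1) []
    let result' :=
      if op = "AND".toList then pvBitAnd result nxt
      else if op = "OR".toList then pvBitOr result nxt
      else pvBitXor result nxt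
    pvLoopA ts result' (i + 2)
  else result
termination_by ts.length - i
decreasing_by omega

def solve (s : String) : String :=
  let ts := (PySem.Str.split₀ s).map String.toList
  String.ofList (pvLoopA ts (PySem.List.pyGetD ts 0 []) 1)

-- ===== PORT B =====
def solve_alt (s : String) : String :=
  let ts := (PySem.Str.split₀ s).map String.toList
  let first := PySem.List.pyGetD ts 0 []
  String.ofList
    ((PySem.List.pyRange 0 first.length 1).foldl
      (fun out k =>
        out ++ [(PySem.List.pyRange 1 ts.length 2).foldl
          (fun bit j =>
            let op := PySem.List.pyGetD ts j []
            let b := PySem.List.pyGetD (PySem.List.pyGetD ts (j + 1) []) k ' '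
            if op = "AND".toList then (if bit = '1' ∧ b = '1' then '1' else '0')
            else if op = "OR".toList then (if bit = '1' ∨ b = '1' then '1' else '0')
            else (if bit ≠ b then '1' else '0'))
          (PySem.List.pyGetD first k ' ')])
      [])

-- ===== PRECONDITION & SPEC =====
-- Pre_ excludes exactly the inputs where B raises IndexError: no tokens, a missing operand
-- (even token count), or an operand shorter than the first token — there A either raises
-- IndexError too, or returns only by accident of Python's and/or short-circuit skipping the
-- out-of-range access.
def Pre_solve (s : String) : Prop :=
  let ts := (PySem.Str.split₀ s).map String.toList
  ts ≠ [] ∧ ts.length % 2 = 1 ∧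
    ((List.range ts.length).all (fun j =>
      !(j % 2 == 0) || decide ((ts.getD 0 []).length ≤ (ts.getD j []).length))) = true
instance (s : String) : Decidable (Pre_solve s) := by unfold Pre_solve; infer_instance

def pvWitness_solve : String := "101 AND 011"

def Spec_solve (s : String) (out : String) : Prop := out = solve_alt s
instance (s : String) (out : String) : Decidable (Spec_solve s out) := by unfold Spec_solve; infer_instance

-- ===== CLAIM (what is proved, stated in full; the proofs are below) =====
def Claim_equal_solve : Prop := ∀ (s : String), Dom_solve s → Pre_solve s → Spec_solve s (solve s)

-- ===== LEMMAS AND PROOFS =====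

theorem pvMapRange_zipWith (cf : Char → Char → Char) :
    ∀ (x y : List Char), x.length ≤ y.length →
    (List.range x.length).map (fun k => cf (x.getD k ' ') (y.getD k ' ')) = List.zipWith cf x y := by
  intro x
  induction x with
  | nil => intro y h; simp
  | cons a t ih =>
    intro y h
    rcases y with _ | ⟨b, u⟩
    · simp at h
    · simp only [List.length_cons, List.range_succ_eq_map, List.map_cons, List.map_map]
      simp only [Function.comp_def, List.getD_cons_zero, List.getD_cons_succ, List.zipWith_cons_cons]
      rw [ih u (by simpa using h)]

-- the foldl over range(len(x)) in A's helpers is a zipWith when y is at least as long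
theorem pvHelper_eq_zipWith (cf : Char → Char → Char)
    (x y : List Char) (hlen : x.length ≤ y.length) :
    (PySem.List.pyRange 0 x.length 1).foldl
      (fun ret i => ret ++ [cf (PySem.List.pyGetD x i ' ') (PySem.List.pyGetD y i ' ')]) [] =
      List.zipWith cf x y := by
  rw [PySem.List.foldl_append_singleton_eq_map]
  rw [show ((x.length : Int)) = ((x.length : Nat) : Int) by simp]
  rw [PySem.List.pyRange_zero_nat, List.map_map]
  simp only [Function.comp_def, PySem.List.pyGetD_natCast]
  simpa using pvMapRange_zipWith cf x y hlen

theorem pvBitAnd_eq (x y : List Char) (h : x.length ≤ y.length) :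
    pvBitAnd x y = List.zipWith (fun a b => if a = '1' ∧ b = '1' then '1' else '0') x y :=
  pvHelper_eq_zipWith (fun a b => if a = '1' ∧ b = '1' then '1' else '0') x y h

theorem pvBitOr_eq (x y : List Char) (h : x.length ≤ y.length) :
    pvBitOr x y = List.zipWith (fun a b => if a = '1' ∨ b = '1' then '1' else '0') x y :=
  pvHelper_eq_zipWith (fun a b => if a = '1' ∨ b = '1' then '1' else '0') x y h

theorem pvBitXor_eq (x y : List Char) (h : x.length ≤ y.length) :
    pvBitXor x y = List.zipWith (fun a b => if a ≠ b then '1' else '0') x y :=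
  pvHelper_eq_zipWith (fun a b => if a ≠ b then '1' else '0') x y h

theorem pvGetD_zipWith (cf : Char → Char → Char) (x y : List Char) (k : Nat)
    (hk : k < x.length) (hlen : x.length ≤ y.length) :
    (List.zipWith cf x y).getD k ' ' = cf (x.getD k ' ') (y.getD k ' ') := by
  have h1 : k < (List.zipWith cf x y).length := by rw [List.length_zipWith]; omega
  rw [List.getD_eq_getElem _ _ h1, List.getD_eq_getElem _ _ hk,
    List.getD_eq_getElem _ _ (by omega : k < y.length), List.getElem_zipWith]

theorem pvMapRange_getD (x : List Char) :
    (List.range x.length).map (fun k => x.getD k ' ') = x := by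
  induction x with
  | nil => simp
  | cons a t ih =>
    simp only [List.length_cons, List.range_succ_eq_map, List.map_cons, List.map_map]
    simp only [Function.comp_def, List.getD_cons_zero, List.getD_cons_succ]
    rw [ih]

theorem pvRange_two_cons (a b : Int) (h : a < b) :
    PySem.List.pyRange a b 2 = a :: PySem.List.pyRange (a + 2) b 2 := by
  rw [PySem.List.pyRange_of_pos a b (by norm_num), PySem.List.pyRange_of_pos (a+2) b (by norm_num)]
  by_cases h2 : a + 2 < b
  · have hc : ((b - a + 2 - 1) / 2).toNat = ((b - (a+2) + 2 - 1) / 2).toNat + 1 := by omega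
    rw [if_pos h, if_pos h2, hc, List.range_succ_eq_map]
    simp only [List.map_cons, List.map_map, Function.comp_def]
    congr 1
    · simp
    · apply List.map_congr_left
      intro k _
      push_cast
      ring
  · have hc : ((b - a + 2 - 1) / 2).toNat = 1 := by omega
    rw [if_pos h, if_neg h2, hc]
    simp

theorem pvRange_two_nil (a b : Int) (h : b ≤ a) : PySem.List.pyRange a b 2 = [] := by
  rw [PySem.List.pyRange_of_pos a b (by norm_num), if_neg (by omega)]
  simp

-- loop interchange: A's row-by-row loop computes, per column k, B's per-column fold
theorem pvLoop_main (ts : List (List Char)) (w : Nat)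
    (hodd : ts.length % 2 = 1)
    (hops : ∀ j, j < ts.length → j % 2 = 0 → w ≤ (ts.getD j []).length) :
    ∀ n i result, ts.length - i ≤ n → i % 2 = 1 → result.length = w →
    pvLoopA ts result i =
      (List.range w).map (fun (k : Nat) =>
        (PySem.List.pyRange (i : Int) (ts.length : Int) 2).foldl
          (fun bit j =>
            if PySem.List.pyGetD ts j [] = "AND".toList then
              (if bit = '1' ∧ PySem.List.pyGetD (PySem.List.pyGetD ts (j + 1) []) (k : Int) ' ' = '1'
               then '1' else '0')
            else if PySem.List.pyGetD ts j [] = "OR".toList then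
              (if bit = '1' ∨ PySem.List.pyGetD (PySem.List.pyGetD ts (j + 1) []) (k : Int) ' ' = '1'
               then '1' else '0')
            else (if bit ≠ PySem.List.pyGetD (PySem.List.pyGetD ts (j + 1) []) (k : Int) ' '
                  then '1' else '0'))
          (result.getD k ' ')) := by
  intro n
  induction n with
  | zero =>
    intro i result hle _ hw
    have hge : ts.length ≤ i := by omega
    rw [pvLoopA, if_neg (by omega), pvRange_two_nil _ _ (by exact_mod_cast hge)]
    simp only [List.foldl_nil]
    rw [← hw, pvMapRange_getD]
  | succ n ihn =>
    intro i result hle hi hw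
    by_cases hlt : i < ts.length
    · have hi1 : i + 1 < ts.length := by omega
      have hnxt := hops (i + 1) hi1 (by omega)
      rw [pvLoopA, if_pos hlt]
      simp only []
      rw [pvRange_two_cons _ _ (by exact_mod_cast hlt)]
      have hcast : ((i : Int) + 1) = ((i + 1 : Nat) : Int) := by push_cast; ring
      have hgi1 : PySem.List.pyGetD ts ((i : Int) + 1) [] = ts.getD (i + 1) [] := by
        rw [hcast, PySem.List.pyGetD_natCast]
      have hlen' : result.length ≤ (PySem.List.pyGetD ts ((i : Int) + 1) []).length := by
        rw [hgi1, hw]; exact hnxt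
      have hstep : ((i : Int) + 2) = ((i + 2 : Nat) : Int) := by push_cast; ring
      -- the three operator branches: the new row equals, per column, one inner step
      by_cases hand : PySem.List.pyGetD ts (i : Int) [] = "AND".toList
      · rw [if_pos hand, pvBitAnd_eq _ _ hlen']
        rw [ihn (i + 2) _ (by omega) (by omega) (by rw [List.length_zipWith]; omega)]
        simp only [List.foldl_cons, if_pos hand, hstep]
        apply List.map_congr_left
        intro k hk
        have hkw : k < w := List.mem_range.mp hk
        congr 1
        rw [pvGetD_zipWith _ _ _ _ (by omega) hlen', PySem.List.pyGetD_natCast]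
      · rw [if_neg hand]
        by_cases hor : PySem.List.pyGetD ts (i : Int) [] = "OR".toList
        · rw [if_pos hor, pvBitOr_eq _ _ hlen']
          rw [ihn (i + 2) _ (by omega) (by omega) (by rw [List.length_zipWith]; omega)]
          simp only [List.foldl_cons, if_neg hand, if_pos hor, hstep]
          apply List.map_congr_left
          intro k hk
          have hkw : k < w := List.mem_range.mp hk
          congr 1
          rw [pvGetD_zipWith _ _ _ _ (by omega) hlen', PySem.List.pyGetD_natCast]
        · rw [if_neg hor, pvBitXor_eq _ _ hlen']
          rw [ihn (i + 2) _ (by omega) (by omega) (by rw [List.length_zipWith]; omega)]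
          simp only [List.foldl_cons, if_neg hand, if_neg hor, hstep]
          apply List.map_congr_left
          intro k hk
          have hkw : k < w := List.mem_range.mp hk
          congr 1
          rw [pvGetD_zipWith _ _ _ _ (by omega) hlen', PySem.List.pyGetD_natCast]
    · rw [pvLoopA, if_neg hlt, pvRange_two_nil _ _ (by exact_mod_cast Nat.le_of_not_lt hlt)]
      simp only [List.foldl_nil]
      rw [← hw, pvMapRange_getD]

-- ===== VERDICT (by name: the statement is the Claim_ definition above) =====
theorem solve_spec : Claim_equal_solve := by
  unfold Claim_equal_solve
  intro s _ hpre
  unfold Spec_solve solve solve_alt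
  obtain ⟨hne, hodd, hball⟩ := hpre
  set ts := (PySem.Str.split₀ s).map String.toList with hts
  have hops : ∀ j, j < ts.length → j % 2 = 0 →
      (ts.getD 0 []).length ≤ (ts.getD j []).length := by
    intro j hj hj2
    have := List.all_eq_true.mp hball j (List.mem_range.mpr hj)
    simpa [hj2] using this
  have hget0 : PySem.List.pyGetD ts (0 : Int) [] = ts.getD 0 [] := by
    rw [show ((0 : Int)) = ((0 : Nat) : Int) by norm_num, PySem.List.pyGetD_natCast]
  have hmain := pvLoop_main ts (ts.getD 0 []).length hodd hops ts.length 1 (ts.getD 0 [])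
    (by omega) (by omega) rfl
  rw [show (((1 : Nat) : Int)) = (1 : Int) by norm_num] at hmain
  simp only [PySem.List.pyGetD_natCast] at hmain
  simp only [hget0]
  congr 1
  rw [hmain, PySem.List.foldl_append_singleton_eq_map]
  rw [show (((ts.getD 0 []).length : Int)) = (((ts.getD 0 []).length : Nat) : Int) by simp]
  rw [PySem.List.pyRange_zero_nat, List.map_map]
  simp only [Function.comp_def, PySem.List.pyGetD_natCast, List.nil_append]
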